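-- pv_equiv track=rewrite | github.com/dereyes5/documentos | modelos ESPE/P3_D1_NRC9901_Reyes_David/python/P3_D1_NRC9901_Reyes_David_No_5.py | tipo_trayectoria
-- ===== SOURCE A (Python) =====
-- def tipo_trayectoria(trayectoria):
--     n = len(trayectoria)
--     if n==1:
--         return "Ciclo simple"
--     else:
--         for i in range(n):
--             for j in range(i+1,n):
--                 if trayectoria[i] == trayectoria[j]:
--                     if i == 0 and j == n-1:
--                         return "Ciclo simple"
--                     else:
--                         return "Ciclo"
--         return "Trayectoria simple"
-- ===== SOURCE B (Python) =====
-- def tipo_trayectoria(trayectoria):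
--     n = len(trayectoria)
--     if n == 1:
--         return "Ciclo simple"
--     if len(set(trayectoria)) == n:
--         return "Trayectoria simple"
--     if trayectoria[0] == trayectoria[-1] and trayectoria[0] not in trayectoria[1:-1]:
--         return "Ciclo simple"
--     return "Ciclo"
-- ===== Notes on version B (the rewrite author's own statement) =====
-- stated objective: alternative
-- what changed: Replaces A's nested first-repeated-index-pair scan by a single set-based distinctness pass plus one fixed-shape first==last / first-not-in-interior test.
import Mathlib
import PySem

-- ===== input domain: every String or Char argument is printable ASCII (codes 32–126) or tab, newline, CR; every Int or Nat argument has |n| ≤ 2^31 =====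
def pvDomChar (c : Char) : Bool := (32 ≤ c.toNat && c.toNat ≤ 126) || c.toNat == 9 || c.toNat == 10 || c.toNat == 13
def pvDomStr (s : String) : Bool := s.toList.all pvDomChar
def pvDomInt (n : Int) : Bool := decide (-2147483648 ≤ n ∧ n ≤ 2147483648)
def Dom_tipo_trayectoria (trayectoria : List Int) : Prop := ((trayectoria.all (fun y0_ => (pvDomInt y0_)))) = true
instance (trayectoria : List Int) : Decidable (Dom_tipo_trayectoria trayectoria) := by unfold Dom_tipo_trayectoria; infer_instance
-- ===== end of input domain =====

-- B replaces A's nested first-repeated-pair scan by a set-based distinctness pass plus one first/last test (alternative algorithm).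


-- ===== PORT A =====
-- inner 'for j in range(i+1, n)' loop with Python's early return as Option
def ttInner (t : List Int) (n i : Int) : List Int → Option String
  | [] => none
  | j :: js =>
    if PySem.List.pyGet? t i = PySem.List.pyGet? t j then
      some (if i = 0 ∧ j = n - 1 then "Ciclo simple" else "Ciclo")
    else ttInner t n i js

-- outer 'for i in range(n)' loop
def ttOuter (t : List Int) (n : Int) : List Int → Option String
  | [] => none
  | i :: is =>
    match ttInner t n i (PySem.List.pyRange (i + 1) n 1) with
    | some s => some s
    | none => ttOuter t n is

def tipo_trayectoria (trayectoria : List Int) : String :=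
  let n : Int := trayectoria.length
  if n = 1 then "Ciclo simple"
  else
    match ttOuter trayectoria n (PySem.List.pyRange 0 n 1) with
    | some s => s
    | none => "Trayectoria simple"

-- ===== PORT B =====
def tipo_trayectoria_alt (trayectoria : List Int) : String :=
  let n : Int := trayectoria.length
  if n = 1 then "Ciclo simple"
  else if ((PySem.Set.ofList trayectoria).length : Int) = n then "Trayectoria simple"
  else
    -- trayectoria[0] == trayectoria[-1] and trayectoria[0] not in trayectoria[1:-1]
    match PySem.List.pyGet? trayectoria 0, PySem.List.pyGet? trayectoria (-1) with
    | some a, some b =>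
      if a = b ∧ a ∉ PySem.List.slice trayectoria (some 1) (some (-1)) then "Ciclo simple"
      else "Ciclo"
    | _, _ => "Ciclo"  -- unreachable: this branch has n ≥ 2

-- ===== PRECONDITION & SPEC =====
def Spec_tipo_trayectoria (trayectoria : List Int) (out : String) : Prop := out = tipo_trayectoria_alt trayectoria
instance (trayectoria : List Int) (out : String) : Decidable (Spec_tipo_trayectoria trayectoria out) := by unfold Spec_tipo_trayectoria; infer_instance

-- ===== CLAIM (what is proved, stated in full; the proofs are below) =====
def Claim_equal_tipo_trayectoria : Prop := ∀ (trayectoria : List Int), Dom_tipo_trayectoria trayectoria → Spec_tipo_trayectoria trayectoria (tipo_trayectoria trayectoria)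

-- ===== LEMMAS AND PROOFS =====

theorem ofList_sublist (xs : List Int) : List.Sublist (PySem.Set.ofList xs) xs := by
  induction xs with
  | nil => simp [PySem.Set.ofList]
  | cons x xs ih =>
    rw [PySem.Set.ofList_cons]
    exact (List.filter_sublist.trans ih).cons₂ x

theorem ofList_length_iff (xs : List Int) :
    ((PySem.Set.ofList xs).length = xs.length) ↔ xs.Nodup := by
  constructor
  · intro h
    have := (ofList_sublist xs).eq_of_length h
    have hn := PySem.Set.nodup_ofList (xs := xs)
    rwa [this] at hn
  · intro h
    rw [PySem.Set.ofList_eq_self_of_nodup xs h]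

theorem inner_none_iff (t : List Int) (n i : Int) (js : List Int) :
    ttInner t n i js = none ↔
      ∀ j ∈ js, PySem.List.pyGet? t i ≠ PySem.List.pyGet? t j := by
  induction js with
  | nil => simp [ttInner]
  | cons j js ih =>
    simp only [ttInner]
    split
    · simp_all
    · simp_all

theorem inner_values (t : List Int) (n i : Int) (js : List Int) (s : String)
    (h : ttInner t n i js = some s) : s = "Ciclo" ∨ s = "Ciclo simple" := by
  induction js with
  | nil => simp [ttInner] at h
  | cons j js ih =>
    simp only [ttInner] at h
    split at h
    · simp only [Option.some.injEq] at h
      split at h <;> simp [← h]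
    · exact ih h

theorem inner_ne_zero (t : List Int) (n i : Int) (js : List Int) (s : String)
    (hi : i ≠ 0) (h : ttInner t n i js = some s) : s = "Ciclo" := by
  induction js with
  | nil => simp [ttInner] at h
  | cons j js ih =>
    simp only [ttInner] at h
    split at h
    · simp only [Option.some.injEq] at h
      rw [if_neg (by tauto)] at h
      exact h.symm
    · exact ih h

theorem inner_append_none (t : List Int) (n i : Int) (js ks : List Int)
    (h : ttInner t n i js = none) :
    ttInner t n i (js ++ ks) = ttInner t n i ks := by
  induction js with
  | nil => simp
  | cons j js ih =>
    simp only [ttInner, List.cons_append]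
    simp only [ttInner] at h
    split at h
    · exact absurd h (by simp)
    · rename_i hcond
      rw [if_neg hcond]
      exact ih h

theorem inner_cs (t : List Int) (n : Int) (ks : List Int)
    (hne : ∀ j ∈ ks, j ≠ n - 1)
    (h : ttInner t n 0 (ks ++ [n - 1]) = some "Ciclo simple") :
    PySem.List.pyGet? t 0 = PySem.List.pyGet? t (n - 1) ∧
      ∀ j ∈ ks, PySem.List.pyGet? t 0 ≠ PySem.List.pyGet? t j := by
  induction ks with
  | nil =>
    simp only [List.nil_append, ttInner] at h
    split at h
    · exact ⟨by assumption, by simp⟩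
    · simp at h
  | cons k ks ih =>
    simp only [List.cons_append, ttInner] at h
    split at h
    · exfalso
      rw [if_neg (by have := hne k (by simp); tauto)] at h
      simp at h
    · have := ih (fun j hj => hne j (by simp [hj])) h
      refine ⟨this.1, ?_⟩
      intro j hj
      rcases List.mem_cons.mp hj with rfl | hj
      · assumption
      · exact this.2 j hj

theorem outer_none_iff (t : List Int) (n : Int) (is : List Int) :
    ttOuter t n is = none ↔
      ∀ i ∈ is, ttInner t n i (PySem.List.pyRange (i + 1) n 1) = none := by
  induction is with
  | nil => simp [ttOuter]
  | cons i is ih =>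
    simp only [ttOuter]
    split
    · simp_all
    · simp_all

theorem outer_ne_zero (t : List Int) (n : Int) (is : List Int) (s : String)
    (hi : ∀ i ∈ is, i ≠ 0) (h : ttOuter t n is = some s) : s = "Ciclo" := by
  induction is with
  | nil => simp [ttOuter] at h
  | cons i is ih =>
    simp only [ttOuter] at h
    split at h
    · cases h
      exact inner_ne_zero t n i _ s (hi i (by simp)) (by assumption)
    · exact ih (fun j hj => hi j (by simp [hj])) h

-- the interior slice trayectoria[1:-1] for a list of length ≥ 2
theorem mid_eq (t : List Int) (h2 : 2 ≤ t.length) :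
    PySem.List.slice t (some 1) (some (-1)) = (t.drop 1).take (t.length - 2) := by
  have h1 : PySem.List.clampIdx t.length 1 = 1 := by
    simp [PySem.List.clampIdx]; omega
  have h3 : t.length - 1 - 1 = t.length - 2 := by omega
  simp only [PySem.List.slice, PySem.List.clampIdx_neg_one, h1, h3]

theorem mid_mem_iff (t : List Int) (h2 : 2 ≤ t.length) (x : Int) :
    x ∈ PySem.List.slice t (some 1) (some (-1)) ↔
      ∃ (k : Nat) (_ : 0 < k) (_ : k < t.length - 1), t[k] = x := by
  rw [mid_eq t h2, List.mem_iff_getElem]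
  constructor
  · rintro ⟨i, hi, rfl⟩
    have hi' : i < t.length - 2 := by simpa using (List.length_take_le _ _).trans_lt' hi
    refine ⟨i + 1, by omega, by omega, ?_⟩
    rw [List.getElem_take, List.getElem_drop]
    congr 1; omega
  · rintro ⟨k, hk0, hk1, rfl⟩
    refine ⟨k - 1, by simp; omega, ?_⟩
    rw [List.getElem_take, List.getElem_drop]
    congr 1; omega

-- endpoint and interior-index facts, then the whole claim for lists of length ≥ 2
theorem main_ge_two (t : List Int) (h2 : 2 ≤ t.length) :
    tipo_trayectoria t = tipo_trayectoria_alt t := by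
  have h0 : 0 < t.length := by omega
  have hl1 : t.length - 1 < t.length := by omega
  have hlen : (2 : Int) ≤ (t.length : Int) := by exact_mod_cast h2
  have hn1 : ¬ ((t.length : Int) = 1) := by omega
  have hpg0 : PySem.List.pyGet? t 0 = some (t[0]'h0) :=
    PySem.List.pyGet?_eq_some_getElem t (by omega) (by omega)
  have hpgn : PySem.List.pyGet? t ((t.length : Int) - 1) = some (t[t.length - 1]'hl1) := by
    rw [PySem.List.pyGet?_eq_some_getElem t (i := (t.length : Int) - 1) (by omega) (by omega)]
    have hidx : ((t.length : Int) - 1).toNat = t.length - 1 := by omega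
    simp only [hidx]
  have hpgneg : PySem.List.pyGet? t (-1) = some (t[t.length - 1]'hl1) := by
    rw [PySem.List.pyGet?_neg_one, List.getLast?_eq_getElem?, List.getElem?_eq_getElem hl1]
  -- bridge between B's interior-membership test and A's pyGet? inequalities
  have hmidIff : (t[0]'h0) ∉ PySem.List.slice t (some 1) (some (-1)) ↔
      (∀ j : Int, 1 ≤ j → j < (t.length : Int) - 1 →
        PySem.List.pyGet? t 0 ≠ PySem.List.pyGet? t j) := by
    rw [mid_mem_iff t h2]
    push Not
    constructor
    · intro hno j hj1 hj2 heq
      have hjn : j.toNat < t.length - 1 := by omega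
      rw [hpg0, PySem.List.pyGet?_eq_some_getElem t (by omega) (by omega)] at heq
      exact hno j.toNat (by omega) hjn (by exact (Option.some.injEq _ _ ▸ heq).symm)
    · intro hall k hk0 hk1 heq
      have := hall (k : Int) (by omega) (by omega)
      rw [hpg0, PySem.List.pyGet?_eq_some_getElem t (by omega) (by exact_mod_cast hk1.trans hl1)] at this
      apply this
      have hkk : ((k : Int)).toNat = k := by omega
      simp only [hkk, heq]
  simp only [tipo_trayectoria, tipo_trayectoria_alt]
  rw [if_neg hn1, if_neg hn1]
  by_cases hnd : t.Nodup
  · -- no duplicates: A's scan finds nothing, B's set test fires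
    have hset : ((PySem.Set.ofList t).length : Int) = (t.length : Int) := by
      exact_mod_cast (ofList_length_iff t).mpr hnd
    rw [if_pos hset]
    have houter : ttOuter t (t.length : Int) (PySem.List.pyRange 0 (t.length : Int) 1) = none := by
      rw [outer_none_iff]
      intro i hi
      rw [inner_none_iff]
      intro j hj heq
      obtain ⟨hi0, hin⟩ := PySem.List.mem_pyRange_one.mp hi
      obtain ⟨hji, hjn⟩ := PySem.List.mem_pyRange_one.mp hj
      rw [PySem.List.pyGet?_eq_some_getElem t hi0 hin,
          PySem.List.pyGet?_eq_some_getElem t (by omega) hjn] at heq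
      exact List.pairwise_iff_getElem.mp hnd i.toNat j.toNat (by omega) (by omega) (by omega)
        (Option.some.injEq _ _ ▸ heq)
    rw [houter]
  · -- a duplicate exists: B's set test fails
    have hset : ¬ ((PySem.Set.ofList t).length : Int) = (t.length : Int) := by
      intro h
      exact hnd ((ofList_length_iff t).mp (by exact_mod_cast h))
    rw [if_neg hset, hpg0, hpgneg]
    change _ = if (t[0]'h0) = (t[t.length - 1]'hl1) ∧
        (t[0]'h0) ∉ PySem.List.slice t (some 1) (some (-1)) then "Ciclo simple" else "Ciclo"
    have hrange : PySem.List.pyRange 0 (t.length : Int) 1 =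
        0 :: PySem.List.pyRange 1 (t.length : Int) 1 := by
      simpa using PySem.List.pyRange_one_cons (a := 0) (b := (t.length : Int)) (by omega)
    have hsing : PySem.List.pyRange ((t.length : Int) - 1) (t.length : Int) 1 =
        [(t.length : Int) - 1] := by
      have h := PySem.List.pyRange_one_singleton ((t.length : Int) - 1)
      rwa [show (t.length : Int) - 1 + 1 = (t.length : Int) by ring] at h
    have hsplit : PySem.List.pyRange 1 (t.length : Int) 1 =
        PySem.List.pyRange 1 ((t.length : Int) - 1) 1 ++ [(t.length : Int) - 1] := by
      rw [PySem.List.pyRange_one_append 1 ((t.length : Int) - 1) (t.length : Int)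
        (by omega) (by omega), hsing]
    by_cases hc : (t[0]'h0) = (t[t.length - 1]'hl1) ∧
        (∀ j : Int, 1 ≤ j → j < (t.length : Int) - 1 →
          PySem.List.pyGet? t 0 ≠ PySem.List.pyGet? t j)
    · -- simple cycle: A's very first inner scan first matches at j = n-1
      rw [if_pos ⟨hc.1, hmidIff.mpr hc.2⟩]
      have hinner1 : ttInner t (t.length : Int) 0 (PySem.List.pyRange 1 ((t.length : Int) - 1) 1) = none := by
        rw [inner_none_iff]
        intro j hj
        obtain ⟨hj1, hj2⟩ := PySem.List.mem_pyRange_one.mp hj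
        exact hc.2 j hj1 hj2
      have hinner : ttInner t (t.length : Int) 0 (PySem.List.pyRange (0 + 1) (t.length : Int) 1) =
          some "Ciclo simple" := by
        rw [show ((0 : Int) + 1) = 1 by ring, hsplit, inner_append_none _ _ _ _ _ hinner1]
        simp only [ttInner]
        rw [if_pos (by rw [hpg0, hpgn]; exact congrArg some hc.1)]
        simp
      rw [hrange]
      simp only [ttOuter, hinner]
    · -- non-simple cycle: A returns from some pair other than (0, n-1)
      rw [if_neg (fun h => hc ⟨h.1, hmidIff.mp h.2⟩)]
      -- the scan does find a pair
      have houter_ne : ttOuter t (t.length : Int) (PySem.List.pyRange 0 (t.length : Int) 1) ≠ none := by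
        intro h
        apply hnd
        apply List.pairwise_iff_getElem.mpr
        intro i j hi hj hij
        have hji : (i : Int) < (t.length : Int) := by exact_mod_cast hi
        have hjj : (j : Int) < (t.length : Int) := by exact_mod_cast hj
        have hinner := (outer_none_iff t _ _).mp h (i : Int)
          (PySem.List.mem_pyRange_one.mpr ⟨by omega, hji⟩)
        have hne := (inner_none_iff t _ _ _).mp hinner (j : Int)
          (PySem.List.mem_pyRange_one.mpr ⟨by omega, hjj⟩)
        intro heq
        apply hne
        rw [PySem.List.pyGet?_eq_some_getElem t (by omega) hji,
            PySem.List.pyGet?_eq_some_getElem t (by omega) hjj]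
        simp only [Int.toNat_natCast]
        exact congrArg some heq
      obtain ⟨s, houter⟩ := Option.ne_none_iff_exists'.mp houter_ne
      rw [houter]
      show s = "Ciclo"
      rw [hrange] at houter
      simp only [ttOuter] at houter
      rcases hinner0 : ttInner t (t.length : Int) 0 (PySem.List.pyRange (0 + 1) (t.length : Int) 1) with _ | s0
      · rw [hinner0] at houter
        exact outer_ne_zero t _ _ s
          (fun i hi => by have := PySem.List.mem_pyRange_one.mp hi; omega) houter
      · rw [hinner0] at houter
        obtain rfl : s0 = s := by cases houter; rfl
        rcases inner_values t _ 0 _ _ hinner0 with hv | hv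
        · rw [hv]
        · exfalso
          rw [show ((0 : Int) + 1) = 1 by ring, hsplit] at hinner0
          have hcs := inner_cs t (t.length : Int) (PySem.List.pyRange 1 ((t.length : Int) - 1) 1)
            (fun j hj => by have := PySem.List.mem_pyRange_one.mp hj; omega)
            (hv ▸ hinner0)
          apply hc
          constructor
          · have := hcs.1
            rw [hpg0, hpgn] at this
            exact Option.some.injEq _ _ ▸ this
          · intro j hj1 hj2
            exact hcs.2 j (PySem.List.mem_pyRange_one.mpr ⟨hj1, hj2⟩)

-- ===== VERDICT (by name: the statement is the Claim_ definition above) =====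
theorem tipo_trayectoria_spec : Claim_equal_tipo_trayectoria := by
  intro t _
  unfold Spec_tipo_trayectoria
  match t with
  | [] => decide
  | [a] => simp [tipo_trayectoria, tipo_trayectoria_alt]
  | a :: b :: rest => exact main_ge_two _ (by simp)
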